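-- pv_equiv track=rewrite | github.com/jmathies/util-process-top-crashes | crashes.py | versionListIsExclusiveTo
-- ===== SOURCE A (Python) =====
-- def versionListIsExclusiveTo(version, vList):
--   # 92.0b6
--   # 92.0.1
--   # 92.0
--   # 94.0a1
--   found = False
--   for v in vList:
--     majorVersionNumber = v.split('.')[0]
--     if version == majorVersionNumber:
--       found = True
--
--   for v in vList:
--     majorVersionNumber = v.split('.')[0]
--     if version != majorVersionNumber:
--       found = False
--   return found
-- ===== SOURCE B (Python) =====
-- def versionListIsExclusiveTo(version, vList):
--   return bool(vList) and all(v.split('.')[0] == version for v in vList)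
-- ===== Notes on version B (the rewrite author's own statement) =====
-- stated objective: simpler
-- what changed: A's two full scans with a mutable flag (set on a match, cleared on a mismatch) are replaced by one short-circuiting pass: non-empty list and every element's major version equals version.
import Mathlib
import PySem

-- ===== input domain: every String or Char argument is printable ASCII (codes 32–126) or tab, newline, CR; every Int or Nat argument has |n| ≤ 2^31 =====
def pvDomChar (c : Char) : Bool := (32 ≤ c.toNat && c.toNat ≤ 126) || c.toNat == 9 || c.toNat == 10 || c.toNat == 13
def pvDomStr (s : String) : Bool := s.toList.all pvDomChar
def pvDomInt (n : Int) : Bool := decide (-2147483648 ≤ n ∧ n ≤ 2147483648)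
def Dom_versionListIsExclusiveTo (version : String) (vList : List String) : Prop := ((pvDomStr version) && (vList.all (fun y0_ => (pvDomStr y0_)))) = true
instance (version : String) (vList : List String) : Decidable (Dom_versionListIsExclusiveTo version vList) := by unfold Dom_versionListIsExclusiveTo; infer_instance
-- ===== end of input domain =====

-- B replaces A's two sequential scans with a mutable flag by a single short-circuiting
-- pass (non-empty ∧ all majors equal); objective: simpler.


-- v.split('.')[0]: splitOn with a non-empty separator never returns [], so [0] never raises and headD is exact
def pvMajor (v : String) : String := String.ofList ((PySem.Chars.splitOn v.toList ['.']).headD [])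

-- ===== PORT A =====
def versionListIsExclusiveTo (version : String) (vList : List String) : Bool :=
  let found := false
  let found := vList.foldl (fun found v =>
    if version == pvMajor v then true else found) found
  let found := vList.foldl (fun found v =>
    if version != pvMajor v then false else found) found
  found

-- ===== PORT B =====
def versionListIsExclusiveTo_alt (version : String) (vList : List String) : Bool :=
  !vList.isEmpty && vList.all (fun v => pvMajor v == version)

-- ===== PRECONDITION & SPEC =====
def Spec_versionListIsExclusiveTo (version : String) (vList : List String) (out : Bool) : Prop := out = versionListIsExclusiveTo_alt version vList
instance (version : String) (vList : List String) (out : Bool) : Decidable (Spec_versionListIsExclusiveTo version vList out) := by unfold Spec_versionListIsExclusiveTo; infer_instance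

-- ===== CLAIM (what is proved, stated in full; the proofs are below) =====
def Claim_equal_versionListIsExclusiveTo : Prop := ∀ (version : String) (vList : List String), Dom_versionListIsExclusiveTo version vList → Spec_versionListIsExclusiveTo version vList (versionListIsExclusiveTo version vList)

-- ===== LEMMAS AND PROOFS =====

-- A's first loop: the flag ends true iff it started true or some element matches
theorem pvFold1 (version : String) (xs : List String) (b : Bool) :
    xs.foldl (fun found v => if version == pvMajor v then true else found) b
      = (b || xs.any (fun v => version == pvMajor v)) := by
  induction xs generalizing b with
  | nil => simp
  | cons x xs ih =>
    simp only [List.foldl_cons]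
    rw [ih]
    by_cases h : (version == pvMajor x) = true <;> simp [List.any_cons, h]

-- A's second loop: the flag survives iff every element matches
theorem pvFold2 (version : String) (xs : List String) (b : Bool) :
    xs.foldl (fun found v => if version != pvMajor v then false else found) b
      = (b && xs.all (fun v => version == pvMajor v)) := by
  induction xs generalizing b with
  | nil => simp
  | cons x xs ih =>
    simp only [List.foldl_cons]
    rw [ih]
    by_cases h : (version == pvMajor x) = true <;> simp [List.all_cons, bne, h]

-- the == in B's predicate is the reverse of A's
theorem pvAllComm (version : String) (xs : List String) :
    xs.all (fun v => pvMajor v == version) = xs.all (fun v => version == pvMajor v) := by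
  induction xs with
  | nil => rfl
  | cons x xs ih => simp only [List.all_cons, BEq.comm]

-- ===== VERDICT (by name: the statement is the Claim_ definition above) =====
theorem versionListIsExclusiveTo_spec : Claim_equal_versionListIsExclusiveTo := by
  intro version vList _
  unfold Spec_versionListIsExclusiveTo versionListIsExclusiveTo versionListIsExclusiveTo_alt
  simp only [pvFold1, pvFold2, pvAllComm, Bool.false_or]
  cases vList with
  | nil => simp
  | cons x xs =>
    by_cases h : ((x :: xs).all (fun v => version == pvMajor v)) = true
    · have hx : (version == pvMajor x) = true := by
        have := h; simp only [List.all_cons, Bool.and_eq_true] at this; exact this.1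
      simp [h, List.any_cons, hx]
    · simp [Bool.eq_false_iff.mpr h]
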